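-- pv_equiv track=rewrite | github.com/Lyonsaldanha/Adventofcode2025 | day3/day3part2.py | find_numbers_iterative
-- ===== SOURCE A (Python) =====
-- def find_numbers_iterative(x):
--     res = []
--     stack = [(0, [])]  # (start_index, current_path)
--
--     while stack:
--         index, path = stack.pop()
--
--         if len(path) == 12:
--             res.append(path)
--             continue
--
--         # Iterate forward and push next states
--         # Reverse range so the leftmost branch is processed first (stack = LIFO)
--         for i in range(len(x) - 1, index - 1, -1):
--             if len(path) + (len(x) - i) < 12:
--                 # Not enough elements remaining to reach length 12
--                 continue
--
--             stack.append((i + 1, path + [x[i]]))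
--
--     return res
-- ===== SOURCE B (Python) =====
-- def find_numbers_iterative(x):
--     n = len(x)
--
--     def rec(index, path):
--         if len(path) == 12:
--             return [path]
--         out = []
--         for i in range(index, n):
--             if len(path) + (n - i) < 12:
--                 continue
--             out.extend(rec(i + 1, path + [x[i]]))
--         return out
--
--     return rec(0, [])
-- ===== Notes on version B (the rewrite author's own statement) =====
-- stated objective: simpler
-- what changed: A's explicit stack machine with reversed-range pushes is replaced by a plain recursive backtracking helper rec(index, path) that iterates forward and concatenates sub-results, producing the same lexicographic order directly.
import Mathlib
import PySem

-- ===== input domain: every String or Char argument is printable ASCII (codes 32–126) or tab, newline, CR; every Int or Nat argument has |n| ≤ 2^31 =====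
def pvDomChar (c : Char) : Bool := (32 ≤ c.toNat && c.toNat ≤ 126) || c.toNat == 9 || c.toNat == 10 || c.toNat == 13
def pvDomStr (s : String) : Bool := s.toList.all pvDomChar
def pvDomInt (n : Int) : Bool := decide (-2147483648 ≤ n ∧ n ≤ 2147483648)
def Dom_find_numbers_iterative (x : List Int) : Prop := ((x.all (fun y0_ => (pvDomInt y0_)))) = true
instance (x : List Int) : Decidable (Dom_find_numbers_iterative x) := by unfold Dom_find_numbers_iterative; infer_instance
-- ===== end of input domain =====

-- B replaces A's explicit stack machine by recursive backtracking (same output, same order); objective: simpler.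


-- ===== PORT A =====
-- Termination measure for the stack loop: each state (index, path) weighs 2^((len-index)+),
-- and every pushed child has a strictly larger index, so the sum of child weights is below the parent's.
def pvNu (l i : Int) : Nat := 2 ^ ((l - i).toNat)

def pvMu (l : Int) (st : List (Int × List Int)) : Nat := (st.map (fun s => pvNu l s.1)).sum

lemma pvGeom (m : Nat) : ((List.range m).map (fun k => 2 ^ (m - 1 - k))).sum = 2 ^ m - 1 := by
  induction m with
  | zero => simp
  | succ m ih =>
    rw [List.range_succ_eq_map]
    simp only [List.map_cons, List.map_map, List.sum_cons]
    have : ((List.range m).map (fun k => 2 ^ (m + 1 - 1 - (k + 1)))).sum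
        = ((List.range m).map (fun k => 2 ^ (m - 1 - k))).sum := by
      congr 1
      apply List.map_congr_left
      intro k _
      congr 1
      omega
    simp only [Function.comp_def] at *
    rw [this, ih]
    have : 1 ≤ 2 ^ m := Nat.one_le_two_pow
    simp only [Nat.add_sub_cancel, Nat.sub_zero]
    rw [pow_succ]
    omega

lemma pvChildrenSum_lt (l index : Int) (p : Int → Bool) :
    ((((PySem.List.pyRange index l 1).filter p).map (fun i => pvNu l (i + 1)))).sum < pvNu l index := by
  have hsub : (((PySem.List.pyRange index l 1).filter p).map (fun i => pvNu l (i + 1))).Sublist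
      ((PySem.List.pyRange index l 1).map (fun i => pvNu l (i + 1))) :=
    ((PySem.List.pyRange index l 1).filter_sublist).map _
  have h1 : (((PySem.List.pyRange index l 1).filter p).map (fun i => pvNu l (i + 1))).sum
      ≤ ((PySem.List.pyRange index l 1).map (fun i => pvNu l (i + 1))).sum :=
    hsub.sum_le_sum (by intro a _; exact Nat.zero_le a)
  have h2 : ((PySem.List.pyRange index l 1).map (fun i => pvNu l (i + 1))).sum
      = ((List.range (l - index).toNat).map (fun k => 2 ^ ((l - index).toNat - 1 - k))).sum := by
    rw [PySem.List.pyRange_one, List.map_map]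
    apply congrArg
    apply List.map_congr_left
    intro k hk
    rw [List.mem_range] at hk
    simp only [Function.comp_def, pvNu]
    congr 1
    omega
  rw [h2, pvGeom] at h1
  have h3 : pvNu l index = 2 ^ (l - index).toNat := rfl
  have : 1 ≤ 2 ^ (l - index).toNat := Nat.one_le_two_pow
  omega

lemma pvFoldlConsIf {α β : Type} (P : α → Prop) [DecidablePred P] (f : α → β) :
    ∀ (l : List α) (rest : List β),
      List.foldl (fun st i => if P i then st else f i :: st) rest l
        = ((l.filter (fun i => !decide (P i))).map f).reverse ++ rest := by
  intro l
  induction l with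
  | nil => intro rest; simp
  | cons a l ih =>
    intro rest
    by_cases h : P a <;> simp [List.foldl_cons, h, ih]

lemma pvMuStep (l index : Int) (P : Int → Prop) [DecidablePred P] (g : Int → List Int)
    (rest : List (Int × List Int)) :
    pvMu l (List.foldl (fun st i => if P i then st else (i + 1, g i) :: st) rest
      (PySem.List.pyRange (l - 1) (index - 1) (-1)))
      < pvNu l index + pvMu l rest := by
  rw [pvFoldlConsIf]
  have hrev : PySem.List.pyRange (l - 1) (index - 1) (-1) = (PySem.List.pyRange index l 1).reverse := by
    rw [PySem.List.pyRange_neg_one_eq_reverse]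
    norm_num
  rw [hrev, List.filter_reverse, List.map_reverse, List.reverse_reverse]
  unfold pvMu
  rw [List.map_append, List.sum_append, List.map_map]
  have := pvChildrenSum_lt l index (fun i => !decide (P i))
  have h2 : (((PySem.List.pyRange index l 1).filter (fun i => !decide (P i))).map
      ((fun s => pvNu l s.1) ∘ fun i => (i + 1, g i))).sum
      = (((PySem.List.pyRange index l 1).filter (fun i => !decide (P i))).map
      (fun i => pvNu l (i + 1))).sum := by rfl
  rw [h2]
  omega

-- Literal port of A: explicit stack (top kept at the HEAD of the Lean list, so Python's
-- append/pop at the end of the list becomes cons/head here), reversed-range pushing, pruning.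
-- x[i] is ported as pyGetD x i 0: on every state the loop reaches, 0 ≤ i < len(x), so Python never raises.
def pvLoopA (x : List Int) (stack : List (Int × List Int)) : List (List Int) :=
  match stack with
  | [] => []
  | (index, path) :: rest =>
    if path.length = 12 then
      path :: pvLoopA x rest
    else
      pvLoopA x (List.foldl
        (fun st i =>
          if (path.length : Int) + ((x.length : Int) - i) < 12 then st
          else (i + 1, path ++ [PySem.List.pyGetD x i 0]) :: st)
        rest
        (PySem.List.pyRange ((x.length : Int) - 1) (index - 1) (-1)))
termination_by pvMu (x.length : Int) stack
decreasing_by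
  · simp only [pvMu, List.map_cons, List.sum_cons]
    have : 1 ≤ pvNu (x.length : Int) index := Nat.one_le_two_pow
    omega
  · have := pvMuStep (x.length : Int) index
      (fun i => (path.length : Int) + ((x.length : Int) - i) < 12)
      (fun i => path ++ [PySem.List.pyGetD x i 0]) rest
    simp only [pvMu, List.map_cons, List.sum_cons]
    exact this

def find_numbers_iterative (x : List Int) : List (List Int) :=
  pvLoopA x [(0, [])]

-- ===== PORT B =====
-- Literal port of B (Source B): recursive backtracking rec(index, path); the Python for-loop with
-- `continue` and `out.extend(..)` is the foldl below; `.attach` only carries the membership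
-- fact needed for termination.
def pvRecB (x : List Int) (index : Int) (path : List Int) : List (List Int) :=
  if path.length = 12 then [path]
  else
    (PySem.List.pyRange index (x.length : Int) 1).attach.foldl
      (fun out t =>
        if (path.length : Int) + ((x.length : Int) - t.1) < 12 then out
        else out ++ pvRecB x (t.1 + 1) (path ++ [PySem.List.pyGetD x t.1 0]))
      []
termination_by ((x.length : Int) - index).toNat
decreasing_by
  have hm := (PySem.List.mem_pyRange_one).1 t.2
  omega

def find_numbers_iterative_alt (x : List Int) : List (List Int) :=
  pvRecB x 0 []

-- ===== PRECONDITION & SPEC =====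
def Spec_find_numbers_iterative (x : List Int) (out : List (List Int)) : Prop := out = find_numbers_iterative_alt x
instance (x : List Int) (out : List (List Int)) : Decidable (Spec_find_numbers_iterative x out) := by unfold Spec_find_numbers_iterative; infer_instance

-- ===== CLAIM (what is proved, stated in full; the proofs are below) =====
def Claim_equal_find_numbers_iterative : Prop := ∀ (x : List Int), Dom_find_numbers_iterative x → Spec_find_numbers_iterative x (find_numbers_iterative x)

-- ===== LEMMAS AND PROOFS =====

lemma pvFoldlExtendIf {α β : Type} (P : α → Prop) [DecidablePred P] (g : α → List β) :
    ∀ (l : List α) (init : List β),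
      List.foldl (fun out i => if P i then out else out ++ g i) init l
        = init ++ (l.filter (fun i => !decide (P i))).flatMap g := by
  intro l
  induction l with
  | nil => intro init; simp
  | cons a l ih =>
    intro init
    by_cases h : P a <;> simp [List.foldl_cons, h, ih]

-- Unfold B's recursion into a flatMap over the pruned candidate indices.
lemma pvRecB_eq (x : List Int) (index : Int) (path : List Int) :
    pvRecB x index path
      = if path.length = 12 then [path]
        else ((PySem.List.pyRange index (x.length : Int) 1).filter
            (fun i => !decide ((path.length : Int) + ((x.length : Int) - i) < 12))).flatMap
            (fun i => pvRecB x (i + 1) (path ++ [PySem.List.pyGetD x i 0])) := by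
  rw [pvRecB]
  by_cases h : path.length = 12
  · simp [h]
  · simp only [h, if_false]
    rw [List.foldl_attach (l := PySem.List.pyRange index (x.length : Int) 1)
      (f := fun out i => if (path.length : Int) + ((x.length : Int) - i) < 12 then out
        else out ++ pvRecB x (i + 1) (path ++ [PySem.List.pyGetD x i 0]))]
    rw [pvFoldlExtendIf (fun i => (path.length : Int) + ((x.length : Int) - i) < 12)
      (fun i => pvRecB x (i + 1) (path ++ [PySem.List.pyGetD x i 0]))]
    simp

-- The stack loop computes the concatenation of the backtracking results of the stacked states.
lemma pvLoopA_eq_flatMap (x : List Int) :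
    ∀ (N : Nat) (stack : List (Int × List Int)), pvMu (x.length : Int) stack ≤ N →
      pvLoopA x stack = stack.flatMap (fun s => pvRecB x s.1 s.2) := by
  intro N
  induction N with
  | zero =>
    intro stack h
    match stack with
    | [] => rw [pvLoopA]; rfl
    | (index, path) :: rest =>
      exfalso
      simp only [pvMu, List.map_cons, List.sum_cons] at h
      have : 1 ≤ pvNu (x.length : Int) index := Nat.one_le_two_pow
      omega
  | succ N ih =>
    intro stack h
    match stack with
    | [] => rw [pvLoopA]; rfl
    | (index, path) :: rest =>
      rw [pvLoopA]
      have hmu : pvMu (x.length : Int) ((index, path) :: rest)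
          = pvNu (x.length : Int) index + pvMu (x.length : Int) rest := by
        simp [pvMu]
      by_cases h12 : path.length = 12
      · simp only [h12, if_true]
        have hrest : pvMu (x.length : Int) rest ≤ N := by
          have : 1 ≤ pvNu (x.length : Int) index := Nat.one_le_two_pow
          omega
        rw [ih rest hrest, List.flatMap_cons, pvRecB_eq, if_pos h12]
        rfl
      · simp only [h12, if_false]
        have hstep := pvMuStep (x.length : Int) index
          (fun i => (path.length : Int) + ((x.length : Int) - i) < 12)
          (fun i => path ++ [PySem.List.pyGetD x i 0]) rest
        have hpush : pvMu (x.length : Int)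
            (List.foldl (fun st i =>
              if (path.length : Int) + ((x.length : Int) - i) < 12 then st
              else (i + 1, path ++ [PySem.List.pyGetD x i 0]) :: st) rest
              (PySem.List.pyRange ((x.length : Int) - 1) (index - 1) (-1))) ≤ N := by
          omega
        rw [ih _ hpush, pvFoldlConsIf, List.flatMap_append]
        have hrev : PySem.List.pyRange ((x.length : Int) - 1) (index - 1) (-1)
            = (PySem.List.pyRange index (x.length : Int) 1).reverse := by
          rw [PySem.List.pyRange_neg_one_eq_reverse]
          norm_num
        rw [hrev, List.filter_reverse, List.map_reverse, List.reverse_reverse]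
        rw [List.flatMap_cons, pvRecB_eq, if_neg h12, List.flatMap_map]

-- ===== VERDICT (by name: the statement is the Claim_ definition above) =====
theorem find_numbers_iterative_spec : Claim_equal_find_numbers_iterative := by
  intro x _
  unfold Spec_find_numbers_iterative find_numbers_iterative find_numbers_iterative_alt
  rw [pvLoopA_eq_flatMap x (pvMu (x.length : Int) [(0, [])]) _ (le_refl _)]
  simp
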